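-- pv_equiv track=rewrite | github.com/LucasIME/adventofcode | 2016/q14/q14_hard.py | contains_n
-- ===== SOURCE A (Python) =====
-- def contains_n(hash, n):
--     for i in range(len(hash)-n+1):
--         base = hash[i]
--         has_diff = False
--         for i2 in range(i, i+n):
--             if hash[i2] != base:
--                 has_diff = True
--                 break
--
--         if not has_diff:
--             return True, base
--     return False, None
-- ===== SOURCE B (Python) =====
-- def contains_n(hash, n):
--     run_char = None
--     run_len = 0
--     for c in hash:
--         if c == run_char:
--             run_len += 1
--         else:
--             run_char = c
--             run_len = 1
--         if run_len >= n:
--             return True, run_char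
--     return False, None
-- ===== Notes on version B (the rewrite author's own statement) =====
-- stated objective: faster
-- what changed: Replaces the nested index-window scan (each start index re-checks n characters) by a single streaming pass that maintains the current run character and run length, answering as soon as a run reaches length n.
import Mathlib
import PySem

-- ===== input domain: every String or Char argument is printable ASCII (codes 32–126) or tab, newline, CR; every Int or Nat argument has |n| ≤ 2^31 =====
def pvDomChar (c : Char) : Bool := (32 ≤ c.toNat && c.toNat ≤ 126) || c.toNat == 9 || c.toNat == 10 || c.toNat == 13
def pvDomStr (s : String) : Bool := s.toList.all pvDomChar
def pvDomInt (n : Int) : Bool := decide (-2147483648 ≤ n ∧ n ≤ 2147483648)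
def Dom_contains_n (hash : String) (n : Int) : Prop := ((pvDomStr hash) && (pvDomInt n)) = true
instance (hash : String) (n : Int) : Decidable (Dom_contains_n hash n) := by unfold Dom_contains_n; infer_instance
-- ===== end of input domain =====

-- B replaces A's nested index-window scan by a single streaming run-length pass (asymptotically faster, O(len) vs O(len*n)).

-- ===== PORT A =====
-- inner loop: 'for i2 in range(i, i+n): if hash[i2] != base: has_diff = True; break'
def pvInnerA (cs : List Char) (base : Char) : List Int → Bool
  | [] => false
  | i2 :: rest =>
    match PySem.List.pyGet? cs i2 with
    | none => false            -- IndexError; unreachable inside Pre_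
    | some c => if c ≠ base then true else pvInnerA cs base rest

-- outer loop: 'for i in range(len(hash)-n+1): …' with the early return
def pvOuterA (cs : List Char) (n : Int) : List Int → Bool × Option String
  | [] => (false, none)
  | i :: rest =>
    match PySem.List.pyGet? cs i with
    | none => (false, none)    -- IndexError (hash[i] on empty hash, n ≤ 0); unreachable inside Pre_
    | some base =>
      let has_diff := pvInnerA cs base (PySem.List.pyRange i (i + n) 1)
      if has_diff = false then (true, some (String.singleton base))
      else pvOuterA cs n rest

def contains_n (hash : String) (n : Int) : Bool × Option String :=
  pvOuterA hash.toList n (PySem.List.pyRange 0 ((hash.toList.length : Int) - n + 1) 1)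

-- ===== PORT B =====
-- single pass: maintain (run_char, run_len); succeed as soon as run_len ≥ n
def pvAltLoop (n : Int) (runChar : Option Char) (runLen : Int) : List Char → Bool × Option String
  | [] => (false, none)
  | c :: rest =>
    let s := if runChar = some c then (runChar, runLen + 1) else (some c, (1 : Int))
    if n ≤ s.2 then (true, s.1.map String.singleton)
    else pvAltLoop n s.1 s.2 rest

def contains_n_alt (hash : String) (n : Int) : Bool × Option String :=
  pvAltLoop n none 0 hash.toList

-- ===== PRECONDITION & SPEC =====
-- Pre_ excludes only the inputs on which A raises IndexError: the empty string with n ≤ 0 (A indexes hash[0] there).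
def Pre_contains_n (hash : String) (n : Int) : Prop := hash = "" → 1 ≤ n
instance (hash : String) (n : Int) : Decidable (Pre_contains_n hash n) := by unfold Pre_contains_n; infer_instance
def pvWitness_contains_n : String × Int := ("aabbb", 3)

def Spec_contains_n (hash : String) (n : Int) (out : Bool × Option String) : Prop := out = contains_n_alt hash n
instance (hash : String) (n : Int) (out : Bool × Option String) : Decidable (Spec_contains_n hash n out) := by unfold Spec_contains_n; infer_instance

-- ===== CLAIM (what is proved, stated in full; the proofs are below) =====
def Claim_equal_contains_n : Prop := ∀ (hash : String) (n : Int), Dom_contains_n hash n → Pre_contains_n hash n → Spec_contains_n hash n (contains_n hash n)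

-- ===== LEMMAS AND PROOFS =====

-- common characterisation: first suffix whose n-prefix exists and is constant
def pvWin (n : Int) : List Char → Bool × Option String
  | [] => (false, none)
  | c :: rest =>
    if n ≤ (rest.length : Int) + 1 ∧ (rest.take (n - 1).toNat).all (· == c) then
      (true, some (String.singleton c))
    else pvWin n rest

theorem pvWin_short (n : Int) (cs : List Char) (h : (cs.length : Int) < n) :
    pvWin n cs = (false, none) := by
  induction cs with
  | nil => simp [pvWin]
  | cons c rest ih =>
    simp only [List.length_cons] at h
    rw [pvWin, if_neg (by omega)]
    exact ih (by omega)

theorem pvInnerA_eq (cs : List Char) (base : Char) (a b : Int)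
    (ha : 0 ≤ a) (hb : b ≤ (cs.length : Int)) :
    pvInnerA cs base (PySem.List.pyRange a b 1)
      = !(((cs.drop a.toNat).take (b - a).toNat).all (· == base)) := by
  by_cases hab : b ≤ a
  · rw [PySem.List.pyRange_one_eq_nil hab]
    have : (b - a).toNat = 0 := by omega
    simp [pvInnerA, this]
  · rw [not_le] at hab
    rw [PySem.List.pyRange_one_cons hab, pvInnerA]
    have hlt : a.toNat < cs.length := by omega
    rw [PySem.List.pyGet?_eq_some_getElem cs ha (by omega : a < (cs.length:Int))]
    have hdrop : cs.drop a.toNat = cs[a.toNat] :: cs.drop (a.toNat + 1) :=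
      List.drop_eq_getElem_cons hlt
    have htn : (b - a).toNat = (b - (a + 1)).toNat + 1 := by omega
    rw [hdrop, htn, List.take_succ_cons, List.all_cons]
    by_cases hc : cs[a.toNat] = base
    · have ha1 : (0:Int) ≤ a + 1 := by omega
      have := pvInnerA_eq cs base (a + 1) b ha1 hb
      have h1 : a.toNat + 1 = (a+1).toNat := by omega
      simp [hc, this, h1]
    · simp [hc]
termination_by (b - a).toNat
decreasing_by omega

theorem pvOuterA_eq (cs : List Char) (n : Int) (hn : 1 ≤ n) (i : Int) (hi : 0 ≤ i) :
    pvOuterA cs n (PySem.List.pyRange i ((cs.length : Int) - n + 1) 1)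
      = pvWin n (cs.drop i.toNat) := by
  by_cases hend : (cs.length : Int) - n + 1 ≤ i
  · rw [PySem.List.pyRange_one_eq_nil hend, pvOuterA]
    rw [pvWin_short n _ (by simp; omega)]
  · rw [not_le] at hend
    rw [PySem.List.pyRange_one_cons hend, pvOuterA]
    have hlt : i.toNat < cs.length := by omega
    rw [PySem.List.pyGet?_eq_some_getElem cs hi (by omega : i < (cs.length:Int))]
    dsimp only
    have hdrop : cs.drop i.toNat = cs[i.toNat] :: cs.drop (i.toNat + 1) :=
      List.drop_eq_getElem_cons hlt
    rw [pvInnerA_eq cs cs[i.toNat] i (i + n) hi (by omega)]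
    have hwin : pvWin n (cs.drop i.toNat)
        = if n ≤ ((cs.drop (i.toNat + 1)).length : Int) + 1 ∧
             ((cs.drop (i.toNat + 1)).take (n - 1).toNat).all (· == cs[i.toNat]) then
            (true, some (String.singleton cs[i.toNat]))
          else pvWin n (cs.drop (i.toNat + 1)) := by
      rw [hdrop, pvWin]
    have hlen : n ≤ ((cs.drop (i.toNat + 1)).length : Int) + 1 := by
      simp; omega
    have htk : (i + n - i).toNat = (n - 1).toNat + 1 := by omega
    rw [hwin, hdrop, htk, List.take_succ_cons, List.all_cons, BEq.rfl, Bool.true_and]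
    by_cases hall : ((cs.drop (i.toNat + 1)).take (n - 1).toNat).all (· == cs[i.toNat]) = true
    · have hA : (!((cs.drop (i.toNat + 1)).take (n - 1).toNat).all (· == cs[i.toNat])) = false := by
        rw [hall]; decide
      have hcond : n ≤ ((cs.drop (i.toNat + 1)).length : Int) + 1 ∧
          ((cs.drop (i.toNat + 1)).take (n - 1).toNat).all (· == cs[i.toNat]) = true :=
        ⟨hlen, hall⟩
      rw [if_pos hA, if_pos hcond]
    · simp only [Bool.not_eq_true] at hall
      have hA : ¬ ((!((cs.drop (i.toNat + 1)).take (n - 1).toNat).all (· == cs[i.toNat])) = false) := by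
        rw [hall]; simp
      rw [if_neg hA, if_neg (fun h => Bool.false_ne_true (hall ▸ h.2))]
      have h1 : (i + 1).toNat = i.toNat + 1 := by omega
      have := pvOuterA_eq cs n hn (i + 1) (by omega)
      rw [h1] at this
      exact this
termination_by ((cs.length : Int) - n + 1 - i).toNat
decreasing_by omega

theorem pvWin_skip (n : Int) (m : Nat) (r c : Char) (cs : List Char)
    (hne : c ≠ r) (hm : (m : Int) < n) :
    pvWin n (List.replicate m r ++ c :: cs) = pvWin n (c :: cs) := by
  induction m with
  | zero => simp
  | succ k ih =>
    rw [List.replicate_succ, List.cons_append, pvWin, if_neg ?_]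
    · exact ih (by omega)
    · rintro ⟨-, h2⟩
      rw [List.take_append, List.all_append, Bool.and_eq_true] at h2
      have h2b := h2.2
      have hge : 1 ≤ (n - 1).toNat - (List.replicate k r).length := by
        simp only [List.length_replicate]; omega
      obtain ⟨j, hj⟩ := Nat.exists_eq_add_of_le hge
      rw [hj, Nat.add_comm 1 j, List.take_succ_cons, List.all_cons, Bool.and_eq_true] at h2b
      exact hne (by simpa using h2b.1)

theorem pvAlt_run (n : Int) (hn : 1 ≤ n) (cs : List Char) (r : Char) (k : Int)
    (hk1 : 1 ≤ k) (hk2 : k < n) :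
    pvAltLoop n (some r) k cs = pvWin n (List.replicate k.toNat r ++ cs) := by
  induction cs generalizing r k with
  | nil =>
    rw [pvWin_short n _ (by simp; omega)]
    simp [pvAltLoop]
  | cons c cs' ih =>
    by_cases hc : r = c
    · subst hc
      have hrep : List.replicate k.toNat r ++ r :: cs' = List.replicate (k + 1).toNat r ++ cs' := by
        rw [show (k + 1).toNat = k.toNat + 1 by omega, List.replicate_succ', List.append_assoc,
          List.singleton_append]
      rw [show pvAltLoop n (some r) k (r :: cs')
            = if n ≤ k + 1 then (true, some (String.singleton r))
              else pvAltLoop n (some r) (k + 1) cs' from by simp [pvAltLoop]]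
      by_cases hnk : n ≤ k + 1
      · rw [if_pos hnk, hrep]
        have hrep2 : List.replicate (k + 1).toNat r ++ cs' = r :: (List.replicate k.toNat r ++ cs') := by
          rw [show (k + 1).toNat = k.toNat + 1 by omega, List.replicate_succ, List.cons_append]
        rw [hrep2, pvWin, if_pos ?_]
        · have htk : (n - 1).toNat = (List.replicate k.toNat r).length := by
            simp only [List.length_replicate]; omega
          constructor
          · simp only [List.length_append, List.length_replicate]; push_cast; omega
          · rw [htk, List.take_append_of_le_length le_rfl]
            simp
      · rw [if_neg hnk, hrep]
        exact ih r (k + 1) (by omega) (by omega)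
    · rw [show pvAltLoop n (some r) k (c :: cs')
            = if n ≤ 1 then (true, some (String.singleton c))
              else pvAltLoop n (some c) 1 cs' from by simp [pvAltLoop, hc]]
      rw [if_neg (by omega : ¬ n ≤ (1:Int))]
      rw [pvWin_skip n k.toNat r c cs' (fun h => hc h.symm) (by omega)]
      have := ih c 1 le_rfl (by omega)
      simpa using this

theorem pvAlt_eq (n : Int) (hn : 1 ≤ n) (cs : List Char) :
    pvAltLoop n none 0 cs = pvWin n cs := by
  cases cs with
  | nil => simp [pvAltLoop, pvWin]
  | cons c cs' =>
    rw [show pvAltLoop n none 0 (c :: cs')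
          = if n ≤ 1 then (true, some (String.singleton c))
            else pvAltLoop n (some c) 1 cs' from by simp [pvAltLoop]]
    by_cases hn1 : n ≤ 1
    · have hcond : n ≤ (cs'.length : Int) + 1 ∧
          ((List.take (n - 1).toNat cs').all (· == c)) = true :=
        ⟨by omega, by rw [show (n - 1).toNat = 0 by omega, List.take_zero, List.all_nil]⟩
      rw [if_pos hn1, pvWin, if_pos hcond]
    · rw [if_neg hn1]
      have := pvAlt_run n hn cs' c 1 le_rfl (by omega)
      simpa using this

-- ===== VERDICT (by name: the statement is the Claim_ definition above) =====
theorem contains_n_spec : Claim_equal_contains_n := by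
  intro hash n _ hpre
  unfold Spec_contains_n contains_n contains_n_alt
  by_cases hn : 1 ≤ n
  · rw [pvOuterA_eq hash.toList n hn 0 le_rfl]
    simp only [Int.toNat_zero, List.drop_zero]
    exact (pvAlt_eq n hn hash.toList).symm
  · cases h : hash.toList with
    | nil =>
      exfalso
      have : hash = "" := String.toList_inj.mp (by simp [h])
      exact hn (hpre this)
    | cons c rest =>
      rw [PySem.List.pyRange_one_cons (show (0:Int) < ((c :: rest).length : Int) - n + 1 by
        simp only [List.length_cons]; push_cast; omega)]
      simp only [pvOuterA, PySem.List.pyGet?_zero_cons]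
      rw [PySem.List.pyRange_one_eq_nil (show 0 + n ≤ (0:Int) by omega)]
      simp only [pvInnerA]
      rw [show pvAltLoop n none 0 (c :: rest)
            = if n ≤ 1 then (true, some (String.singleton c))
              else pvAltLoop n (some c) 1 rest from by simp [pvAltLoop]]
      rw [if_pos (by omega : n ≤ (1:Int))]
      simp
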